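-- pv_equiv track=rewrite | github.com/DanielHuji-RB/RB-article | Python/Functions_base/Functions/arrangeData.py | count_psd_vs_burst_number
-- ===== SOURCE A (Python) =====
-- def count_psd_vs_burst_number(fea_name):
--     #Descriptuion this func is counting how many power psd features are they comperd to burst features
--     psd_num = 0
--     burst_num = 0
--     for i in fea_name :
--        # temp= i[-7:]
--         if 'MeanPSD' in i:
--             psd_num   = psd_num+1
--         else:
--             burst_num = burst_num+1
--
--
--     return psd_num,burst_num
-- ===== SOURCE B (Python) =====
-- def count_psd_vs_burst_number(fea_name):
--     # Split the names into the two groups first, then measure each group: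
--     # no running counters, no branch-per-element bookkeeping.
--     psd_list = [name for name in fea_name if 'MeanPSD' in name]
--     burst_list = [name for name in fea_name if 'MeanPSD' not in name]
--     return len(psd_list), len(burst_list)
-- ===== Notes on version B (the rewrite author's own statement) =====
-- stated objective: alternative
-- what changed: Instead of a single loop incrementing two counters per element, B materialises the two groups as filtered sublists in two staged passes and returns their lengths.
import Mathlib
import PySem

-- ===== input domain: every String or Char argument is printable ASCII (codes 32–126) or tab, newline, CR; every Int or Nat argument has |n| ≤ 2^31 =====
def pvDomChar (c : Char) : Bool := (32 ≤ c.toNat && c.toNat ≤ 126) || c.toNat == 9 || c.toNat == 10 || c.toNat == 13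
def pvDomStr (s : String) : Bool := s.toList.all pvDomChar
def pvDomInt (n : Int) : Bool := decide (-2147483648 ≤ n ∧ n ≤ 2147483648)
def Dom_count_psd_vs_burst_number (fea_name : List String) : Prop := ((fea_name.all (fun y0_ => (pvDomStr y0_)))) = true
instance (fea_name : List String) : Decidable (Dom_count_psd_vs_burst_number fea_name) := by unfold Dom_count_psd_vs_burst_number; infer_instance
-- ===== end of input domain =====

-- B replaces A's counter-incrementing loop by two staged filtering passes that materialise the PSD and burst name lists and return their lengths (alternative decomposition).


-- ===== PORT A =====
def count_psd_vs_burst_number (fea_name : List String) : Int × Int :=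
  fea_name.foldl (fun (acc : Int × Int) i =>
    if PySem.Str.isIn "MeanPSD" i then (acc.1 + 1, acc.2) else (acc.1, acc.2 + 1)) (0, 0)

-- ===== PORT B =====
def count_psd_vs_burst_number_alt (fea_name : List String) : Int × Int :=
  let psd_list := fea_name.filter (fun name => PySem.Str.isIn "MeanPSD" name)
  let burst_list := fea_name.filter (fun name => !PySem.Str.isIn "MeanPSD" name)
  ((psd_list.length : Int), (burst_list.length : Int))

-- ===== PRECONDITION & SPEC =====
def Spec_count_psd_vs_burst_number (fea_name : List String) (out : Int × Int) : Prop := out = count_psd_vs_burst_number_alt fea_name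
instance (fea_name : List String) (out : Int × Int) : Decidable (Spec_count_psd_vs_burst_number fea_name out) := by unfold Spec_count_psd_vs_burst_number; infer_instance

-- ===== CLAIM (what is proved, stated in full; the proofs are below) =====
def Claim_equal_count_psd_vs_burst_number : Prop := ∀ (fea_name : List String), Dom_count_psd_vs_burst_number fea_name → Spec_count_psd_vs_burst_number fea_name (count_psd_vs_burst_number fea_name)

-- ===== LEMMAS AND PROOFS =====
lemma foldl_count_eq_filter_lengths (l : List String) (p b : Int) :
    l.foldl (fun (acc : Int × Int) i =>
      if PySem.Str.isIn "MeanPSD" i then (acc.1 + 1, acc.2) else (acc.1, acc.2 + 1)) (p, b)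
    = (p + ((l.filter (fun name => PySem.Str.isIn "MeanPSD" name)).length : Int),
       b + ((l.filter (fun name => !PySem.Str.isIn "MeanPSD" name)).length : Int)) := by
  induction l generalizing p b with
  | nil => simp
  | cons x xs ih =>
    simp only [List.foldl_cons, List.filter_cons]
    by_cases h : PySem.Str.isIn "MeanPSD" x = true
    · rw [if_pos h, ih]
      replace h : PySem.Chars.isIn ['M','e','a','n','P','S','D'] x.toList = true := h
      simp [h]
      push_cast
      ring
    · rw [if_neg h, ih]
      replace h : PySem.Chars.isIn ['M','e','a','n','P','S','D'] x.toList = false :=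
        Bool.eq_false_iff.mpr h
      simp [h]
      push_cast
      ring

-- ===== VERDICT (by name: the statement is the Claim_ definition above) =====
theorem count_psd_vs_burst_number_spec : Claim_equal_count_psd_vs_burst_number := by
  intro fea_name _
  unfold Spec_count_psd_vs_burst_number count_psd_vs_burst_number count_psd_vs_burst_number_alt
  rw [foldl_count_eq_filter_lengths]
  simp
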